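-- pv_equiv track=rewrite | github.com/MrBrantCode/unitest_baseline | mut_generate/mist_train_cf/cf_64374/solution.py | largest_prime_and_sum
-- ===== SOURCE A (Python) =====
-- def largest_prime_and_sum(input_vector):
--     def is_prime(n):
--         if n <= 1:
--             return False
--         elif n <= 3:
--             return True
--         elif n % 2 == 0 or n % 3 == 0:
--             return False
--         i = 5
--         while i * i <= n:
--             if n % i == 0 or n % (i + 2) == 0:
--                 return False
--             i += 6
--         return True
--
--     largest_prime = -1
--     for num in input_vector:
--         if num > largest_prime and is_prime(num):
--             largest_prime = num
--     return sum(int(digit) for digit in str(largest_prime)) if largest_prime != -1 else None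
-- ===== SOURCE B (Python) =====
-- def largest_prime_and_sum(input_vector):
--     def is_prime(n):
--         if n <= 1:
--             return False
--         if n <= 3:
--             return True
--         if n % 2 == 0 or n % 3 == 0:
--             return False
--         i = 5
--         while i * i <= n:
--             if n % i == 0 or n % (i + 2) == 0:
--                 return False
--             i += 6
--         return True
--
--     primes = [x for x in input_vector if is_prime(x)]
--     if not primes:
--         return None
--     m = max(primes)
--     s = 0
--     while m > 0:
--         s += m % 10
--         m //= 10
--     return s
-- ===== Notes on version B (the rewrite author's own statement) =====
-- stated objective: alternative
-- what changed: A's single max-tracking pass with a short-circuit primality guard and a str()-based digit sum becomes filter-all-primes then max() plus an arithmetic digit-sum loop (m % 10, m //= 10).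
import Mathlib
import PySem

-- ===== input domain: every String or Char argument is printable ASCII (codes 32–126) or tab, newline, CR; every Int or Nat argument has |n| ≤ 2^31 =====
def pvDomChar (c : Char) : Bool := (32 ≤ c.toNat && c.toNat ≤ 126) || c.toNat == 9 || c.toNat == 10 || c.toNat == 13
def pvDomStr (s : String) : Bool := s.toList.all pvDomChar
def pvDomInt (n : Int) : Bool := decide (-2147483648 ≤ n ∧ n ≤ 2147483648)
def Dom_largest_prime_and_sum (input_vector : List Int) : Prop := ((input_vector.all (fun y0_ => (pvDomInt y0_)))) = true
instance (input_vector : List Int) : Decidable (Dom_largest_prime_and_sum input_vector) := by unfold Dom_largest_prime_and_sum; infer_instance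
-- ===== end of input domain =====

-- B replaces A's max-tracking pass (with short-circuit primality guard) and str()-based digit
-- sum by filter-all-primes + max() + an arithmetic digit-sum loop; alternative decomposition.


-- ===== PORT A =====
-- shared helper: the nested `is_prime` (identical code in Source A and Source B); the 6k±1 trial loop
def isPrimeLoop (n i : Int) : Bool :=
  if h : i * i ≤ n then
    if PySem.Int.mod n i == 0 || PySem.Int.mod n (i + 2) == 0 then false
    else isPrimeLoop n (i + 6)
  else true
termination_by (n + 1 - i).toNat
decreasing_by
  have h1 : i ≤ i * i := by nlinarith [sq_nonneg (2 * i - 1)]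
  omega

def isPrime (n : Int) : Bool :=
  if n ≤ 1 then false
  else if n ≤ 3 then true
  else if PySem.Int.mod n 2 == 0 || PySem.Int.mod n 3 == 0 then false
  else isPrimeLoop n 5

-- int(digit) never raises here: it is only applied to digits of a positive integer, so getD 0 is unreachable
def largest_prime_and_sum (input_vector : List Int) : Option Int :=
  let lp := input_vector.foldl
    (fun largest_prime num => if largest_prime < num && isPrime num then num else largest_prime) (-1)
  if lp ≠ -1 then
    some (((PySem.Int.toStr lp).toList.map
      (fun digit => (PySem.Int.ofStr? (String.ofList [digit])).getD 0)).sum)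
  else none

-- ===== PORT B =====
-- Source B's `while m > 0: s += m % 10; m //= 10`
def digitSumLoopB (m s : Int) : Int :=
  if h : 0 < m then digitSumLoopB (PySem.Int.floordiv m 10) (s + PySem.Int.mod m 10) else s
termination_by m.toNat
decreasing_by
  rw [PySem.Int.floordiv_eq_ediv_of_pos (by norm_num)]
  omega

def largest_prime_and_sum_alt (input_vector : List Int) : Option Int :=
  let primes := input_vector.filter (fun x => isPrime x)
  match PySem.List.max? primes (fun y => y) with
  | none => none
  | some m => some (digitSumLoopB m 0)

-- ===== PRECONDITION & SPEC =====
def Spec_largest_prime_and_sum (input_vector : List Int) (out : Option Int) : Prop := out = largest_prime_and_sum_alt input_vector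
instance (input_vector : List Int) (out : Option Int) : Decidable (Spec_largest_prime_and_sum input_vector out) := by unfold Spec_largest_prime_and_sum; infer_instance

-- ===== CLAIM (what is proved, stated in full; the proofs are below) =====
def Claim_equal_largest_prime_and_sum : Prop := ∀ (input_vector : List Int), Dom_largest_prime_and_sum input_vector → Spec_largest_prime_and_sum input_vector (largest_prime_and_sum input_vector)

-- ===== LEMMAS AND PROOFS =====

lemma isPrime_two_le {n : Int} (h : isPrime n = true) : 2 ≤ n := by
  unfold isPrime at h
  by_cases h1 : n ≤ 1
  · simp [h1] at h
  · omega

-- value of int() on a single digit character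
lemma charVal_digitChar (k : Nat) (hk : k < 10) :
    (PySem.Int.ofChars? [Nat.digitChar k]).getD 0 = (k : Int) := by
  interval_cases k <;> decide

-- sum of int() over the characters produced by Nat.toDigitsCore equals the base-10 digit sum
lemma core_sum : ∀ (f n : Nat) (acc : List Char), n < f →
    ((Nat.toDigitsCore 10 f n acc).map
        (fun d => (PySem.Int.ofStr? (String.ofList [d])).getD 0)).sum
      = ((Nat.digits 10 n).map (fun k => (k : Int))).sum
        + (acc.map (fun d => (PySem.Int.ofStr? (String.ofList [d])).getD 0)).sum := by
  intro f
  induction f with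
  | zero => intro n acc h; omega
  | succ f ih =>
    intro n acc h
    rw [Nat.toDigitsCore]
    by_cases h0 : n / 10 = 0
    · simp only [h0, if_pos]
      by_cases hn : n = 0
      · subst hn; simp [charVal_digitChar 0 (by norm_num)]
      · rw [Nat.digits_def' (by norm_num) (Nat.pos_of_ne_zero hn)]
        have : Nat.digits 10 (n / 10) = [] := by rw [h0]; simp
        simp [this, charVal_digitChar (n % 10) (by omega)]
    · simp only [h0, if_false]
      rw [ih (n / 10) _ (by omega)]
      rw [Nat.digits_def' (by norm_num) (by omega : 0 < n)]
      simp [charVal_digitChar (n % 10) (by omega)]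
      ring

-- A's string-based digit sum, for a positive integer, is the base-10 digit sum
lemma strsum_eq_digits (m : Int) (hm : 0 < m) :
    ((PySem.Int.toStr m).toList.map
        (fun d => (PySem.Int.ofStr? (String.ofList [d])).getD 0)).sum
      = ((Nat.digits 10 m.toNat).map (fun k => (k : Int))).sum := by
  rw [PySem.Int.toList_toStr]
  unfold PySem.Int.toChars
  rw [if_neg (by omega)]
  unfold Nat.toDigits
  rw [core_sum (m.toNat + 1) m.toNat [] (by omega)]
  simp

-- B's arithmetic loop also computes the base-10 digit sum
lemma digitSumLoopB_eq (m s : Int) (hm : 0 ≤ m) :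
    digitSumLoopB m s = s + ((Nat.digits 10 m.toNat).map (fun k => (k : Int))).sum := by
  induction m, s using digitSumLoopB.induct with
  | case1 m s h ih =>
    rw [digitSumLoopB, dif_pos h]
    rw [PySem.Int.floordiv_eq_ediv_of_pos (by norm_num),
        PySem.Int.mod_eq_emod_of_pos (by norm_num)] at ih ⊢
    rw [ih (by omega)]
    rw [Nat.digits_def' (b := 10) (by norm_num) (by omega : 0 < m.toNat)]
    have h1 : (m / 10).toNat = m.toNat / 10 := by omega
    have h2 : m % 10 = ((m.toNat % 10 : Nat) : Int) := by omega
    rw [h1, h2]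
    simp
    ring
  | case2 m s h =>
    rw [digitSumLoopB, dif_neg h]
    have : m = 0 := by omega
    subst this
    simp

-- A's fold equals a running max over the prime-filtered list
lemma foldA_eq (l : List Int) (acc : Int) :
    l.foldl (fun largest_prime num =>
        if largest_prime < num && isPrime num then num else largest_prime) acc
      = (l.filter (fun x => isPrime x)).foldl max acc := by
  induction l generalizing acc with
  | nil => rfl
  | cons a t ih =>
    by_cases hp : isPrime a = true
    · rw [List.foldl_cons, List.filter_cons_of_pos (by simp [hp]), List.foldl_cons, ih]
      congr 1
      simp only [hp, Bool.and_true, decide_eq_true_eq]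
      split_ifs with h
      · exact (max_eq_right h.le).symm
      · exact (max_eq_left (by omega)).symm
    · have hp' : isPrime a = false := by simpa using hp
      rw [List.foldl_cons, List.filter_cons_of_neg (by simp [hp'])]
      simp only [hp', Bool.and_false, Bool.false_eq_true, ite_false]
      exact ih acc

-- ===== VERDICT (by name: the statement is the Claim_ definition above) =====
theorem largest_prime_and_sum_spec : Claim_equal_largest_prime_and_sum := by
  intro iv _
  unfold Spec_largest_prime_and_sum largest_prime_and_sum largest_prime_and_sum_alt
  simp only []
  rw [foldA_eq]
  cases hfl : iv.filter (fun x => isPrime x) with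
  | nil => simp [PySem.List.max?]
  | cons x t =>
    have hx : isPrime x = true := by
      have : x ∈ iv.filter (fun x => isPrime x) := by rw [hfl]; exact List.mem_cons_self
      exact (List.mem_filter.1 this).2
    have hx2 : 2 ≤ x := isPrime_two_le hx
    have hM : x ≤ t.foldl max x := (PySem.List.le_foldl_max t x).1
    rw [PySem.List.max?_id_cons]
    simp only [List.foldl_cons]
    rw [max_eq_right (by omega : (-1 : Int) ≤ x)]
    rw [if_pos (by omega : t.foldl max x ≠ -1)]
    rw [strsum_eq_digits _ (by omega), digitSumLoopB_eq _ _ (by omega)]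
    simp
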